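-- pv_equiv track=rewrite | github.com/HKUDS/OpenSpace | openspace/mcp_preflight.py | _machine_status
-- ===== SOURCE A (Python) =====
-- def _machine_status(server_statuses: list[str]) -> str:
--     if server_statuses and all(status == "ready" for status in server_statuses):
--         return "ready"
--     if any(status == "ready" for status in server_statuses):
--         return "partial"
--     if any(status == "broken" for status in server_statuses):
--         return "partial"
--     return "missing"
-- ===== SOURCE B (Python) =====
-- def _machine_status(server_statuses: list[str]) -> str:
--     r = 0
--     b = 0
--     for s in server_statuses:
--         if s == "ready":
--             r += 1
--         elif s == "broken":
--             b += 1
--     n = len(server_statuses)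
--     if n and r == n:
--         return "ready"
--     if r or b:
--         return "partial"
--     return "missing"
-- ===== Notes on version B (the rewrite author's own statement) =====
-- stated objective: alternative
-- what changed: Replaces the three separate all/any scans with a single counting pass (r = #ready, b = #broken) followed by a count-based decision (r==n, r or b).
import Mathlib
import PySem

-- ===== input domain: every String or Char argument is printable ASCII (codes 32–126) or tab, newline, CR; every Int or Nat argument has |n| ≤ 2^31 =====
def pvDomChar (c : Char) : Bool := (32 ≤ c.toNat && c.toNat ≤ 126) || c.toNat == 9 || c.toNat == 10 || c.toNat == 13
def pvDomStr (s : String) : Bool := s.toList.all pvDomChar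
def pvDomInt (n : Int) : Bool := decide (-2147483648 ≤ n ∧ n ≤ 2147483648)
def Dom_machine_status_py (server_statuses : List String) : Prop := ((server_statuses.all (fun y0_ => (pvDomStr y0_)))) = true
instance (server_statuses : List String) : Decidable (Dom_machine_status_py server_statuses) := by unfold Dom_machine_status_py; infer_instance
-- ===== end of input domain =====

-- B replaces A's three all/any scans by one counting pass and a count-based decision (alternative, same cost).

-- ===== PORT A =====
def machine_status_py (server_statuses : List String) : String :=
  if server_statuses ≠ [] ∧ server_statuses.all (fun status => status == "ready") then "ready"
  else if server_statuses.any (fun status => status == "ready") then "partial"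
  else if server_statuses.any (fun status => status == "broken") then "partial"
  else "missing"

-- ===== PORT B =====
def machine_status_py_alt (server_statuses : List String) : String :=
  let rb := server_statuses.foldl
    (fun (p : Int × Int) s =>
      if s = "ready" then (p.1 + 1, p.2)
      else if s = "broken" then (p.1, p.2 + 1)
      else p) (0, 0)
  let n : Int := server_statuses.length
  if n ≠ 0 ∧ rb.1 = n then "ready"
  else if rb.1 ≠ 0 ∨ rb.2 ≠ 0 then "partial"
  else "missing"

-- ===== PRECONDITION & SPEC =====
def Spec_machine_status_py (server_statuses : List String) (out : String) : Prop := out = machine_status_py_alt server_statuses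
instance (server_statuses : List String) (out : String) : Decidable (Spec_machine_status_py server_statuses out) := by unfold Spec_machine_status_py; infer_instance

-- ===== CLAIM (what is proved, stated in full; the proofs are below) =====
def Claim_equal_machine_status_py : Prop := ∀ (server_statuses : List String), Dom_machine_status_py server_statuses → Spec_machine_status_py server_statuses (machine_status_py server_statuses)

-- ===== LEMMAS AND PROOFS =====

-- the counting fold computes (r0 + #ready, b0 + #broken)
theorem pv_fold_counts (xs : List String) (r0 b0 : Int) :
    xs.foldl (fun (p : Int × Int) s =>
      if s = "ready" then (p.1 + 1, p.2)
      else if s = "broken" then (p.1, p.2 + 1)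
      else p) (r0, b0)
    = (r0 + (xs.count "ready" : Int), b0 + (xs.count "broken" : Int)) := by
  induction xs generalizing r0 b0 with
  | nil => simp
  | cons x xs ih =>
    by_cases hx : x = "ready"
    · subst hx
      simp [List.foldl_cons, ih]
      ring
    · by_cases hb : x = "broken"
      · subst hb
        simp [List.foldl_cons, ih]
        ring
      · simp [List.foldl_cons, hx, hb, ih]

theorem pv_all_ready (xs : List String) :
    xs.all (fun s => s == "ready") = true ↔ xs.count "ready" = xs.length := by
  constructor
  · intro h
    rw [List.count_eq_length]
    intro a ha
    have := List.all_eq_true.mp h a ha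
    exact (beq_iff_eq.mp this).symm
  · intro h
    rw [List.all_eq_true]
    intro a ha
    exact beq_iff_eq.mpr ((List.count_eq_length.mp h a ha).symm)

theorem pv_any_count (xs : List String) (v : String) :
    xs.any (fun s => s == v) = true ↔ xs.count v ≠ 0 := by
  rw [List.any_eq_true]
  constructor
  · rintro ⟨a, ha, hb⟩
    have : a = v := beq_iff_eq.mp hb
    subst this
    have := List.count_pos_iff.mpr ha
    omega
  · intro h
    have hv : v ∈ xs := List.count_pos_iff.mp (Nat.pos_of_ne_zero h)
    exact ⟨v, hv, beq_iff_eq.mpr rfl⟩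

-- ===== VERDICT (by name: the statement is the Claim_ definition above) =====
theorem machine_status_py_spec : Claim_equal_machine_status_py := by
  intro xs _
  unfold Spec_machine_status_py machine_status_py machine_status_py_alt
  simp only [pv_fold_counts xs 0 0, zero_add]
  have hr := pv_any_count xs "ready"
  have hb := pv_any_count xs "broken"
  have ha := pv_all_ready xs
  have hcr : xs.count "ready" ≤ xs.length := List.count_le_length
  have hne : (xs ≠ []) ↔ xs.length ≠ 0 := by simp [List.length_eq_zero_iff]
  split_ifs with h1 h2 h3 h4 h5 h6 h7 h8 h9 h10 <;>
    first
    | rfl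
    | (exfalso;
       simp only [hr, hb, ha, hne, ne_eq, not_and, not_or, not_not] at *;
       omega)
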